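-- pv_equiv track=rewrite | github.com/loingtan/PreAnnotate | pre_annotate.py | find_word_indices
-- ===== SOURCE A (Python) =====
-- def find_word_indices(sentence_text, word, search_start):
--     """Find the start and end index of a word within text, preserving punctuation positions"""
--     start_index = sentence_text.find(word, search_start)
--     if start_index != -1:
--         end_index = start_index + len(word)
--
--
--         prev_char = sentence_text[start_index - 1] if start_index > 0 else ' '
--         next_char = sentence_text[end_index] if end_index < len(
--             sentence_text) else ' '
--
--         last_char = word[-1] if word else ''
--         if last_char in '.,!?:;"\'()[]{}':
--             end_index -= 1
--
--         if (prev_char.isspace() or prev_char in '.,!?:;"\'()[]{}') and \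
--            (next_char.isspace() or next_char in '.,!?:;"\'()[]{}' or next_char == ''):
--             return start_index, end_index
--
--         #
--         return find_word_indices(sentence_text, word, start_index + 1)
--     return None, None
-- ===== SOURCE B (Python) =====
-- PUNCT = '.,!?:;"\'()[]{}'
--
--
-- def find_word_indices(sentence_text, word, search_start):
--     """Scan candidate positions left-to-right and return the first occurrence
--     of word whose neighbours are whitespace/punctuation boundaries."""
--     n = len(sentence_text)
--     lw = len(word)
--     lo = search_start if search_start >= 0 else n + search_start
--     if lo < 0:
--         lo = 0
--     adjust = 1 if word[-1:] in PUNCT else 0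
--     for i in range(lo, n - lw + 1):
--         if sentence_text[i:i + lw] == word:
--             prev = sentence_text[i - 1] if i > 0 else ' '
--             nxt = sentence_text[i + lw] if i + lw < n else ' '
--             if (prev.isspace() or prev in PUNCT) and (nxt.isspace() or nxt in PUNCT):
--                 return i, i + lw - adjust
--     return None, None
-- ===== Notes on version B (the rewrite author's own statement) =====
-- stated objective: alternative
-- what changed: A's recursive retry (str.find, boundary check, recurse from start_index+1) is replaced by a single non-recursive left-to-right scan over all candidate positions in range(lo, n-len(word)+1), returning the first occurrence of word with whitespace/punctuation boundaries; the punctuation end-adjustment is precomputed once via word[-1:].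
import Mathlib
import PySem

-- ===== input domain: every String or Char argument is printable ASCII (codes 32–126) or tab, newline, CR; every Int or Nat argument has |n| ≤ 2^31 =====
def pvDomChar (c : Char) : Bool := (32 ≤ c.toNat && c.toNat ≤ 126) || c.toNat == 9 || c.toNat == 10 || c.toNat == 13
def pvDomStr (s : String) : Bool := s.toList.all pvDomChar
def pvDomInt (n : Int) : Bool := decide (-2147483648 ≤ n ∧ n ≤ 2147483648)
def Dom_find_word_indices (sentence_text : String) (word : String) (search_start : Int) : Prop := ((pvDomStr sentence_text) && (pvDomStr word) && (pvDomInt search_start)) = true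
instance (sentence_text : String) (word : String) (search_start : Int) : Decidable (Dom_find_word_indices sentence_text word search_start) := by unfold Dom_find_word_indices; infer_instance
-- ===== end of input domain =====

-- B replaces A's recursive retry (str.find, check boundaries, recurse from start+1) by a single
-- left-to-right scan over all candidate positions, returning the first occurrence with good
-- boundaries; same return value everywhere (objective: alternative decomposition, not speed).

-- the punctuation character class both Pythons share as a string literal
def pvPunct : List Char := ".,!?:;\"'()[]{}".toList

-- ===== PORT A =====
-- bound used only for A's termination: a successful find lies between the clamped start and len(s)
theorem pvFindFromBounds (s w : List Char) (start : Int)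
    (h : PySem.Chars.findFrom s w start none ≠ -1) :
    (if start < 0 then (if start + (s.length : Int) < 0 then 0 else start + (s.length : Int)) else start)
      ≤ PySem.Chars.findFrom s w start none ∧ PySem.Chars.findFrom s w start none ≤ (s.length : Int) := by
  unfold PySem.Chars.findFrom at *
  set st : Int := if start < 0 then (if start + (s.length : Int) < 0 then 0 else start + (s.length : Int)) else start with hst
  have hst0 : 0 ≤ st := by rw [hst]; split_ifs <;> omega
  by_cases hle : (s.length : Int) < st
  · simp only [← hst, if_pos hle] at h; exact absurd rfl h
  · simp only [← hst, if_neg hle] at h ⊢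
    set r := PySem.Chars.find (List.drop st.toNat (List.take (s.length : Int).toNat s)) w with hr
    by_cases hr1 : r = -1
    · simp [hr1] at h
    · simp only [if_neg hr1] at h ⊢
      have h0 := PySem.Chars.neg_one_le_find (List.drop st.toNat (List.take (s.length : Int).toNat s)) w
      have h1 := PySem.Chars.find_le_length (List.drop st.toNat (List.take (s.length : Int).toNat s)) w
      rw [← hr] at h0 h1
      simp [List.length_drop] at h1
      omega

-- the single decreasing fact for A's retry recursion, named so the port's term stays small
theorem pvDecA (s w : List Char) (start : Int)
    (h : PySem.Chars.findFrom s w start none ≠ -1) :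
    ((s.length : Int) + 2 -
        (if PySem.Chars.findFrom s w start none + 1 < 0 then
          (if PySem.Chars.findFrom s w start none + 1 + (s.length : Int) < 0 then 0
           else PySem.Chars.findFrom s w start none + 1 + (s.length : Int))
         else min (PySem.Chars.findFrom s w start none + 1) ((s.length : Int) + 2))).toNat
      < ((s.length : Int) + 2 -
        (if start < 0 then (if start + (s.length : Int) < 0 then 0 else start + (s.length : Int))
         else min start ((s.length : Int) + 2))).toNat := by
  have hb := pvFindFromBounds s w start h
  split_ifs at hb ⊢ <;> omega

-- literal port of A: find from search_start; if found, check prev/next boundary characters,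
-- adjust the end for a punctuation-final word, else retry from start_index + 1
def pvFindA (s w : List Char) (start : Int) : Option Int × Option Int :=
  let start_index := PySem.Chars.findFrom s w start none
  if hfi : start_index ≠ -1 then
    let end_index := start_index + (w.length : Int)
    let prev_char : Char := if start_index > 0 then PySem.List.pyGetD s (start_index - 1) ' ' else ' '
    let next_char : Char := if end_index < (s.length : Int) then PySem.List.pyGetD s end_index ' ' else ' '
    -- last_char = word[-1] if word else '' (a 0/1-char string); '' is "in" any string, as in Python
    let last_char : List Char := (w.getLast?).elim [] (fun c => [c])
    let end_index := if PySem.Chars.isIn last_char pvPunct then end_index - 1 else end_index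
    -- Python's 'next_char == ""' branch is unreachable (next_char is always one char) and is dropped
    if (PySem.Chars.isspace prev_char || pvPunct.contains prev_char)
        && (PySem.Chars.isspace next_char || pvPunct.contains next_char) then
      (some start_index, some end_index)
    else
      pvFindA s w (start_index + 1)
  else
    (none, none)
termination_by ((s.length : Int) + 2 -
    (if start < 0 then (if start + (s.length : Int) < 0 then 0 else start + (s.length : Int))
     else min start ((s.length : Int) + 2))).toNat
decreasing_by
  exact pvDecA s w start hfi

def find_word_indices (sentence_text : String) (word : String) (search_start : Int) : Option Int × Option Int :=
  pvFindA sentence_text.toList word.toList search_start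

-- ===== PORT B =====
-- literal port of B's for-loop over range(lo, n - lw + 1) with early return
def pvFindBLoop (s w : List Char) (adjust : Int) : List Int → Option Int × Option Int
  | [] => (none, none)
  | i :: rest =>
    if PySem.List.slice s (some i) (some (i + (w.length : Int))) = w then
      let prev : Char := if i > 0 then PySem.List.pyGetD s (i - 1) ' ' else ' '
      let nxt : Char := if i + (w.length : Int) < (s.length : Int) then PySem.List.pyGetD s (i + (w.length : Int)) ' ' else ' '
      if (PySem.Chars.isspace prev || pvPunct.contains prev)
          && (PySem.Chars.isspace nxt || pvPunct.contains nxt) then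
        (some i, some (i + (w.length : Int) - adjust))
      else pvFindBLoop s w adjust rest
    else pvFindBLoop s w adjust rest

def pvFindB (s w : List Char) (search_start : Int) : Option Int × Option Int :=
  let n : Int := s.length
  let lw : Int := w.length
  let lo := if search_start ≥ 0 then search_start else n + search_start
  let lo := if lo < 0 then 0 else lo
  -- adjust = 1 if word[-1:] in PUNCT else 0
  let adjust : Int := if PySem.Chars.isIn (PySem.List.slice w (some (-1)) none) pvPunct then 1 else 0
  pvFindBLoop s w adjust (PySem.List.pyRange lo (n - lw + 1) 1)

def find_word_indices_alt (sentence_text : String) (word : String) (search_start : Int) : Option Int × Option Int :=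
  pvFindB sentence_text.toList word.toList search_start

-- ===== PRECONDITION & SPEC =====
def Spec_find_word_indices (sentence_text : String) (word : String) (search_start : Int) (out : Option Int × Option Int) : Prop := out = find_word_indices_alt sentence_text word search_start
instance (sentence_text : String) (word : String) (search_start : Int) (out : Option Int × Option Int) : Decidable (Spec_find_word_indices sentence_text word search_start out) := by unfold Spec_find_word_indices; infer_instance

-- ===== CLAIM (what is proved, stated in full; the proofs are below) =====
def Claim_equal_find_word_indices : Prop := ∀ (sentence_text : String) (word : String) (search_start : Int), Dom_find_word_indices sentence_text word search_start → Spec_find_word_indices sentence_text word search_start (find_word_indices sentence_text word search_start)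

-- ===== LEMMAS AND PROOFS =====

theorem pvSliceMatch (s w : List Char) (i : Int) (hi : 0 ≤ i) :
    (PySem.List.slice s (some i) (some (i + (w.length : Int))) = w) ↔ w <+: s.drop i.toNat := by
  rw [PySem.List.slice_toNat s (a := i) (b := i + (w.length : Int)) hi (by omega)]
  have h2 : (i + (w.length : Int)).toNat - i.toNat = w.length := by omega
  rw [h2, List.prefix_iff_eq_take, eq_comm]

theorem pvSkip (s w : List Char) (adjust lo si top : Int) (h0 : 0 ≤ lo) (hls : lo ≤ si)
    (hnm : ∀ i : Int, lo ≤ i → i < si → ¬ (w <+: s.drop i.toNat)) :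
    pvFindBLoop s w adjust (PySem.List.pyRange lo top 1) = pvFindBLoop s w adjust (PySem.List.pyRange si top 1) := by
  induction hk : (si - lo).toNat generalizing lo with
  | zero =>
    have : lo = si := by omega
    rw [this]
  | succ n ih =>
    have hlt : lo < si := by omega
    by_cases htop : lo < top
    · rw [PySem.List.pyRange_one_cons htop]
      have hne : ¬ (PySem.List.slice s (some lo) (some (lo + (w.length : Int))) = w) := by
        rw [pvSliceMatch s w lo h0]
        exact hnm lo le_rfl hlt
      simp only [pvFindBLoop, if_neg hne]
      exact ih (lo + 1) (by omega) (by omega)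
        (fun i hi1 hi2 => hnm i (by omega) hi2) (by omega)
    · rw [PySem.List.pyRange_one_eq_nil (by omega), PySem.List.pyRange_one_eq_nil (by omega)]

theorem pvClamp (n ss : Int) :
    (if (if ss ≥ 0 then ss else n + ss) < 0 then 0 else (if ss ≥ 0 then ss else n + ss))
      = (if ss < 0 then (if ss + n < 0 then 0 else ss + n) else ss) := by
  split_ifs <;> omega

theorem pvLastEq (w : List Char) : (w.getLast?).elim [] (fun c => [c]) = PySem.List.slice w (some (-1)) none := by
  cases hw : w with
  | nil => decide
  | cons c cs =>
    rw [PySem.List.slice_from_neg_one, ← hw, List.drop_length_sub_one (by simp [hw]),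
      List.getLast?_eq_some_getLast (l := w) (by simp [hw])]
    rfl

theorem pvFindFromPos (s w : List Char) (start : Int)
    (h : PySem.Chars.findFrom s w start none ≠ -1) :
    w <+: s.drop (PySem.Chars.findFrom s w start none).toNat ∧
    ∀ i : Int, (if start < 0 then (if start + (s.length : Int) < 0 then 0 else start + (s.length : Int)) else start) ≤ i →
      i < PySem.Chars.findFrom s w start none → ¬ w <+: s.drop i.toNat := by
  unfold PySem.Chars.findFrom at *
  set st : Int := if start < 0 then (if start + (s.length : Int) < 0 then 0 else start + (s.length : Int)) else start with hst
  have hst0 : 0 ≤ st := by rw [hst]; split_ifs <;> omega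
  by_cases hle : (s.length : Int) < st
  · simp only [← hst, if_pos hle] at h; exact absurd rfl h
  · simp only [← hst, if_neg hle] at h ⊢
    rw [show ((s.length : Int)).toNat = s.length by omega, List.take_length] at h ⊢
    set r := PySem.Chars.find (List.drop st.toNat s) w with hr
    by_cases hr1 : r = -1
    · simp [hr1] at h
    · simp only [if_neg hr1] at h ⊢
      have h0 : 0 ≤ r := by
        have := PySem.Chars.neg_one_le_find (List.drop st.toNat s) w
        rw [← hr] at this; omega
      have hspec := PySem.Chars.find_spec (s := List.drop st.toNat s) (sub := w) (by rw [← hr]; exact h0)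
      rw [← hr] at hspec
      constructor
      · have := hspec.1
        rw [List.drop_drop] at this
        have heq : st.toNat + r.toNat = (st + r).toNat := by omega
        rwa [heq] at this
      · intro i hi1 hi2 hpre
        have hj : (i - st).toNat < r.toNat := by omega
        have hne := hspec.2 (i - st).toNat hj
        rw [List.drop_drop] at hne
        have heq : st.toNat + (i - st).toNat = i.toNat := by omega
        rw [heq] at hne
        exact hne hpre

theorem pvFindFromNone (s w : List Char) (start : Int)
    (h : PySem.Chars.findFrom s w start none = -1)
    (hle : (if start < 0 then (if start + (s.length : Int) < 0 then 0 else start + (s.length : Int)) else start) ≤ (s.length : Int)) :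
    ∀ i : Int, (if start < 0 then (if start + (s.length : Int) < 0 then 0 else start + (s.length : Int)) else start) ≤ i →
      ¬ w <+: s.drop i.toNat := by
  unfold PySem.Chars.findFrom at h
  set st : Int := if start < 0 then (if start + (s.length : Int) < 0 then 0 else start + (s.length : Int)) else start with hst
  have hst0 : 0 ≤ st := by rw [hst]; split_ifs <;> omega
  rw [if_neg (show ¬ ((s.length : Int) < st) by omega)] at h
  rw [show ((s.length : Int)).toNat = s.length by omega, List.take_length] at h
  set r := PySem.Chars.find (List.drop st.toNat s) w with hr
  by_cases hr1 : r = -1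
  · have hnot : ¬ w <:+: List.drop st.toNat s := by
      rw [← PySem.Chars.find_eq_neg_one_iff, ← hr]; exact hr1
    intro i hi hpre
    have hsuf : List.drop i.toNat s <:+ List.drop st.toNat s := by
      rw [show i.toNat = st.toNat + (i.toNat - st.toNat) by omega, ← List.drop_drop]
      exact List.drop_suffix _ _
    exact hnot (hpre.isInfix.trans hsuf.isInfix)
  · exfalso
    rw [if_neg hr1] at h
    have := PySem.Chars.neg_one_le_find (List.drop st.toNat s) w
    rw [← hr] at this
    omega

theorem pvFindBEq (s w : List Char) (start : Int) :
    pvFindB s w start = pvFindBLoop s w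
      (if PySem.Chars.isIn (PySem.List.slice w (some (-1)) none) pvPunct then 1 else 0)
      (PySem.List.pyRange
        (if start < 0 then (if start + (s.length : Int) < 0 then 0 else start + (s.length : Int)) else start)
        ((s.length : Int) - (w.length : Int) + 1) 1) := by
  simp only [pvFindB]
  rw [pvClamp]

theorem pvMain (s w : List Char) (start : Int) : pvFindA s w start = pvFindB s w start := by
  have hclamp : (0:Int) ≤ (if start < 0 then (if start + (s.length : Int) < 0 then 0 else start + (s.length : Int)) else start) := by
    split_ifs <;> omega
  rw [pvFindBEq]
  set st : Int := if start < 0 then (if start + (s.length : Int) < 0 then 0 else start + (s.length : Int)) else start with hst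
  by_cases hfi : PySem.Chars.findFrom s w start none = -1
  · rw [pvFindA, dif_neg (by simpa using hfi)]
    by_cases hn : (s.length : Int) < st
    · rw [PySem.List.pyRange_one_eq_nil (by omega)]
      rfl
    · by_cases htop : st ≤ (s.length : Int) - (w.length : Int) + 1
      · rw [pvSkip s w _ st ((s.length : Int) - (w.length : Int) + 1) _ hclamp htop
          (fun i h1 _ => pvFindFromNone s w start hfi (by omega) i h1)]
        rw [PySem.List.pyRange_one_eq_nil le_rfl]
        rfl
      · rw [PySem.List.pyRange_one_eq_nil (by omega)]
        rfl
  · have hb := pvFindFromBounds s w start hfi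
    have hp := pvFindFromPos s w start hfi
    rw [← hst] at hb hp
    set si : Int := PySem.Chars.findFrom s w start none with hsi
    have hsi0 : 0 ≤ si := by omega
    have hfit : si + (w.length : Int) ≤ (s.length : Int) := by
      have h1 := hp.1.length_le
      rw [List.length_drop] at h1
      omega
    rw [pvSkip s w _ st si _ hclamp hb.1 (fun i h1 h2 => hp.2 i h1 h2)]
    rw [PySem.List.pyRange_one_cons (show si < (s.length : Int) - (w.length : Int) + 1 by omega)]
    rw [pvFindA, dif_pos (by simpa using hfi)]
    simp only [pvFindBLoop, ← hsi]
    rw [if_pos ((pvSliceMatch s w si hsi0).mpr hp.1)]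
    by_cases hc : ((PySem.Chars.isspace (if si > 0 then PySem.List.pyGetD s (si - 1) ' ' else ' ') ||
        pvPunct.contains (if si > 0 then PySem.List.pyGetD s (si - 1) ' ' else ' ')) &&
        (PySem.Chars.isspace (if si + (w.length : Int) < (s.length : Int) then PySem.List.pyGetD s (si + (w.length : Int)) ' ' else ' ') ||
        pvPunct.contains (if si + (w.length : Int) < (s.length : Int) then PySem.List.pyGetD s (si + (w.length : Int)) ' ' else ' '))) = true
    · rw [if_pos hc, if_pos hc]
      rw [pvLastEq w]
      split_ifs <;> simp
    · rw [if_neg hc, if_neg hc]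
      have hrec := pvMain s w (si + 1)
      rw [hrec, pvFindBEq]
      rw [if_neg (show ¬ (si + 1 < 0) by omega)]
termination_by ((s.length : Int) + 2 -
    (if start < 0 then (if start + (s.length : Int) < 0 then 0 else start + (s.length : Int))
     else min start ((s.length : Int) + 2))).toNat
decreasing_by
  exact pvDecA s w start hfi

-- ===== VERDICT (by name: the statement is the Claim_ definition above) =====
theorem find_word_indices_spec : Claim_equal_find_word_indices := by
  intro st wd ss _
  unfold Spec_find_word_indices find_word_indices find_word_indices_alt
  exact pvMain _ _ _
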